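-- pv_equiv track=rewrite | github.com/colinjroberts/advent-of-code-2021 | p06.py | process_day_list
-- ===== SOURCE A (Python) =====
-- def process_day_list(input_list):
--     input_list = input_list
--     for i, fish in enumerate(input_list):
--         new_fish_to_make = 0
--         if fish > 0:
--             input_list[i] -= 1
--         elif fish == 0:
--             new_fish_to_make += 1
--             input_list[i] = 6
--         for new_fish in range(new_fish_to_make):
--             input_list.append(9)
--     return input_list
-- ===== SOURCE B (Python) =====
-- def process_day_list(input_list):
--     count = 0
--     for i, fish in enumerate(input_list):
--         if fish > 0:
--             input_list[i] = fish - 1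
--         elif fish == 0:
--             input_list[i] = 6
--             count += 1
--     input_list.extend([8] * count)
--     return input_list
-- ===== Notes on version B (the rewrite author's own statement) =====
-- stated objective: simpler
-- what changed: B makes a single pass over only the original elements, counting zeros, and appends the spawned fish as one batch of 8s at the end, instead of A's iteration over the growing list that appends 9s and later re-decrements them to 8.
import Mathlib
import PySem

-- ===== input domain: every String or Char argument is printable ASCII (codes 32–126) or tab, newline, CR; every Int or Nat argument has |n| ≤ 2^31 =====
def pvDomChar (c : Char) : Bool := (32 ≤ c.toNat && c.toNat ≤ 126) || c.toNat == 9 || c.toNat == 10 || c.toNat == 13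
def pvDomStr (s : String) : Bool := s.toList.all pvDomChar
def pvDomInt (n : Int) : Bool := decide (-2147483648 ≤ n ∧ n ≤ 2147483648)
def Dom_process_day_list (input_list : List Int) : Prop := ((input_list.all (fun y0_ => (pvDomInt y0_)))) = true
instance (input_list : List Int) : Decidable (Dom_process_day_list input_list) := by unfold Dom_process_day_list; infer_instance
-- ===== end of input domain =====

-- Both programs mutate the argument list in place in Python; the equivalence proved here is about
-- the returned value (B performs the same in-place mutation). B is simpler: one pass over the
-- original elements counting zeros, then one batch-append of 8s, instead of A's iteration over
-- the growing list that appends 9s and later decrements them to 8.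

-- ===== PORT A =====
-- A iterates by index over the list while appending to it; the state at index i is the processed
-- prefix `done` and the yet unvisited suffix `todo` (appends go to the end of `todo`).
def pvLoopA (done todo : List Int) : List Int :=
  match todo with
  | [] => done
  | fish :: rest =>
    if fish > 0 then pvLoopA (done ++ [fish - 1]) rest
    else if fish = 0 then pvLoopA (done ++ [6]) (rest ++ [9])
    else pvLoopA (done ++ [fish]) rest
termination_by todo.length + todo.count 0
decreasing_by
  · simp [List.count_cons]; omega
  · simp_all [List.count_cons, List.count_append]
  · simp [List.count_cons]; omega

def process_day_list (input_list : List Int) : List Int := pvLoopA [] input_list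

-- ===== PORT B =====
def pvStepB (acc : List Int × Nat) (fish : Int) : List Int × Nat :=
  if fish > 0 then ((fish - 1) :: acc.1, acc.2)
  else if fish = 0 then (6 :: acc.1, acc.2 + 1)
  else (fish :: acc.1, acc.2)

def process_day_list_alt (input_list : List Int) : List Int :=
  let r := input_list.foldl pvStepB ([], 0)
  r.1.reverse ++ List.replicate r.2 8

-- ===== PRECONDITION & SPEC =====
def Spec_process_day_list (input_list : List Int) (out : List Int) : Prop := out = process_day_list_alt input_list
instance (input_list : List Int) (out : List Int) : Decidable (Spec_process_day_list input_list out) := by unfold Spec_process_day_list; infer_instance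

-- ===== CLAIM (what is proved, stated in full; the proofs are below) =====
def Claim_equal_process_day_list : Prop := ∀ (input_list : List Int), Dom_process_day_list input_list → Spec_process_day_list input_list (process_day_list input_list)

-- ===== LEMMAS AND PROOFS =====
def pvF (x : Int) : Int := if x > 0 then x - 1 else if x = 0 then 6 else x

lemma pvLoopA_nines : ∀ (k : Nat) (done : List Int),
    pvLoopA done (List.replicate k 9) = done ++ List.replicate k 8 := by
  intro k
  induction k with
  | zero => intro done; simp [pvLoopA]
  | succ n ih =>
    intro done
    rw [List.replicate_succ, pvLoopA]
    simp only [show (9:Int) > 0 by norm_num, if_pos]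
    rw [ih]
    simp [List.replicate_succ]

lemma pvLoopA_spec : ∀ (todo done : List Int) (k : Nat),
    pvLoopA done (todo ++ List.replicate k 9)
      = done ++ todo.map pvF ++ List.replicate (k + todo.count 0) 8 := by
  intro todo
  induction todo with
  | nil => intro done k; simp [pvLoopA_nines]
  | cons x rest ih =>
    intro done k
    rcases lt_trichotomy x 0 with hx | hx | hx
    · rw [List.cons_append, pvLoopA]
      simp only [if_neg (by omega : ¬ x > 0), if_neg (by omega : ¬ x = 0)]
      rw [ih]
      simp [pvF, List.count_cons, if_neg (by omega : ¬ x > 0), if_neg (by omega : ¬ x = 0),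
        show (x == (0:Int)) = false by simp; omega]
    · subst hx
      rw [List.cons_append, pvLoopA]
      simp only [show ¬ (0:Int) > 0 by norm_num, if_neg, if_pos rfl, not_false_iff]
      have : (rest ++ List.replicate k 9) ++ [9] = rest ++ List.replicate (k + 1) 9 := by
        simp [List.replicate_succ']
      rw [this, ih]
      simp [pvF, List.count_cons]
      omega
    · rw [List.cons_append, pvLoopA]
      simp only [if_pos hx]
      rw [ih]
      simp [pvF, if_pos hx, if_neg (by omega : ¬ x = 0), List.count_cons,
        show (x == (0:Int)) = false by simp; omega]

lemma pvFoldB_spec : ∀ (l acc : List Int) (c : Nat),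
    l.foldl pvStepB (acc, c) = ((l.map pvF).reverse ++ acc, c + l.count 0) := by
  intro l
  induction l with
  | nil => intro acc c; simp
  | cons x rest ih =>
    intro acc c
    rcases lt_trichotomy x 0 with hx | hx | hx
    · rw [List.foldl_cons]
      simp only [pvStepB, if_neg (by omega : ¬ x > 0), if_neg (by omega : ¬ x = 0)]
      rw [ih]
      simp [pvF, List.count_cons, if_neg (by omega : ¬ x > 0), if_neg (by omega : ¬ x = 0),
        show (x == (0:Int)) = false by simp; omega]
    · subst hx
      rw [List.foldl_cons]
      simp only [pvStepB, show ¬ (0:Int) > 0 by norm_num, if_neg, if_pos rfl, not_false_iff]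
      rw [ih]
      simp [pvF, List.count_cons]
      omega
    · rw [List.foldl_cons]
      simp only [pvStepB, if_pos hx]
      rw [ih]
      simp [pvF, if_pos hx, if_neg (by omega : ¬ x = 0), List.count_cons,
        show (x == (0:Int)) = false by simp; omega]

-- ===== VERDICT (by name: the statement is the Claim_ definition above) =====
theorem process_day_list_spec : Claim_equal_process_day_list := by
  intro l _
  unfold Spec_process_day_list process_day_list process_day_list_alt
  have hA := pvLoopA_spec l [] 0
  simp only [List.replicate_zero, List.append_nil, List.nil_append, Nat.zero_add] at hA
  rw [hA, pvFoldB_spec]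
  simp
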